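-- pv_equiv track=rewrite | github.com/Harshk10-star/advent-of-code-2023 | day4/day4Part2.py | count_matching_numbers
-- ===== SOURCE A (Python) =====
-- def count_matching_numbers(card):
--     separator_index = card.index('|')
--     count = 0
--     winning_numbers = set(card[separator_index + 1:])
--     for i in range(separator_index):
--         if card[i] in winning_numbers:
--             count += 1
--     return count
-- ===== SOURCE B (Python) =====
-- def count_matching_numbers(card):
--     separator_index = card.index('|')
--     counts = {}
--     for x in card[:separator_index]:
--         counts[x] = counts.get(x, 0) + 1
--     return sum(counts.get(w, 0) for w in set(card[separator_index + 1:]))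
-- ===== Notes on version B (the rewrite author's own statement) =====
-- stated objective: alternative
-- what changed: Instead of scanning each left-half position and testing set membership, B builds a frequency dict of the left half once and sums the counts of the distinct winning numbers; duplicates on the left are still counted via the frequency table.
import Mathlib
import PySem

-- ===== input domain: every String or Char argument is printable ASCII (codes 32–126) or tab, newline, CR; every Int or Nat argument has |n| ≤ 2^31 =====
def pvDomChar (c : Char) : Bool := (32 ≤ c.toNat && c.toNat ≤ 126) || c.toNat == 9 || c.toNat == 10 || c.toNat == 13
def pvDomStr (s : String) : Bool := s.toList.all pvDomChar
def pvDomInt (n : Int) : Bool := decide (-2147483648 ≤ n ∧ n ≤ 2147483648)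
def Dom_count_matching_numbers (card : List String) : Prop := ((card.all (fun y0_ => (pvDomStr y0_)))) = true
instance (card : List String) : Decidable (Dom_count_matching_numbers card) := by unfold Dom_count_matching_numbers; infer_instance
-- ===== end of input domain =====

-- B replaces the per-position membership scan of the left half by a frequency dict of the
-- left half plus a sum over the distinct winning numbers (alternative decomposition, same cost).

-- ===== PORT A =====
def count_matching_numbers (card : List String) : Int :=
  match PySem.List.index? card "|" with
  | none => 0  -- Python raises ValueError here; excluded by Pre_
  | some sep =>
    let winning : PySem.Set String :=
      PySem.Set.ofList (PySem.List.slice card (some ((sep : Int) + 1)) none)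
    (PySem.List.pyRange 0 (sep : Int) 1).foldl
      (fun count i =>
        if winning.contains (PySem.List.pyGetD card i "") then count + 1 else count) (0 : Int)

-- ===== PORT B =====
def count_matching_numbers_alt (card : List String) : Int :=
  match PySem.List.index? card "|" with
  | none => 0  -- Python raises ValueError here; excluded by Pre_
  | some sep =>
    let counts : PySem.Dict String Int :=
      (PySem.List.slice card none (some (sep : Int))).foldl
        (fun d x => PySem.Dict.insert d x (PySem.Dict.getD d x 0 + 1)) PySem.Dict.empty
    let winning : PySem.Set String :=
      PySem.Set.ofList (PySem.List.slice card (some ((sep : Int) + 1)) none)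
    (winning.map (fun w => PySem.Dict.getD counts w 0)).sum

-- ===== PRECONDITION & SPEC =====
-- Pre_ excludes exactly the inputs with no '|' element, where Python A (and B) raise ValueError.
def Pre_count_matching_numbers (card : List String) : Prop := ("|" : String) ∈ card
instance (card : List String) : Decidable (Pre_count_matching_numbers card) := by
  unfold Pre_count_matching_numbers; infer_instance
def pvWitness_count_matching_numbers : List String := ["41", "48", "41", "|", "41", "9"]
def Spec_count_matching_numbers (card : List String) (out : Int) : Prop := out = count_matching_numbers_alt card
instance (card : List String) (out : Int) : Decidable (Spec_count_matching_numbers card out) := by unfold Spec_count_matching_numbers; infer_instance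

-- ===== CLAIM (what is proved, stated in full; the proofs are below) =====
def Claim_equal_count_matching_numbers : Prop := ∀ (card : List String), Dom_count_matching_numbers card → Pre_count_matching_numbers card → Spec_count_matching_numbers card (count_matching_numbers card)

-- ===== LEMMAS AND PROOFS =====

-- sum over a duplicate-free list of the indicator of x is the 0/1 membership test
lemma pv_sum_indicator (W : List String) (x : String) (hW : W.Nodup) :
    (W.map (fun w => if x = w then (1 : Int) else 0)).sum
      = if W.contains x then 1 else 0 := by
  induction W with
  | nil => simp
  | cons w ws ih =>
    rcases List.nodup_cons.mp hW with ⟨hw, hws⟩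
    by_cases hx : x = w
    · subst hx
      have : (ws.map (fun w' => if x = w' then (1 : Int) else 0)).sum = 0 := by
        rw [List.sum_eq_zero]
        intro y hy
        rcases List.mem_map.mp hy with ⟨z, hz, rfl⟩
        simp only [ite_eq_right_iff]
        intro h; exact absurd (h ▸ hz) hw
      simp [this]
    · simp only [List.map_cons, List.sum_cons, if_neg hx, zero_add, ih hws,
        List.contains_cons]
      have : (x == w) = false := by simp [hx]
      simp [this]

-- summing the multiplicities of the distinct members equals counting positions whose
-- element is a member
lemma pv_sum_count_eq_countP (W : List String) (hW : W.Nodup) (L : List String) :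
    (W.map (fun w => (L.count w : Int))).sum
      = (L.countP (fun x => W.contains x) : Int) := by
  induction L with
  | nil => simp
  | cons x l ih =>
    have hcount : ∀ w : String, ((x :: l).count w : Int)
        = (l.count w : Int) + (if x = w then (1 : Int) else 0) := by
      intro w
      by_cases h : x = w
      · subst h; simp
      · simp [h]
    calc (W.map (fun w => ((x :: l).count w : Int))).sum
        = (W.map (fun w => (l.count w : Int) + (if x = w then (1 : Int) else 0))).sum := by
          exact congrArg List.sum (List.map_congr_left (fun w _ => hcount w))
      _ = (W.map (fun w => (l.count w : Int))).sum
            + (W.map (fun w => if x = w then (1 : Int) else 0)).sum := by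
          rw [← List.sum_map_add]
      _ = (l.countP (fun x => W.contains x) : Int)
            + (if W.contains x then 1 else 0) := by
          rw [ih, pv_sum_indicator W x hW]
      _ = ((x :: l).countP (fun x => W.contains x) : Int) := by
          by_cases h : W.contains x <;> simp [List.countP_cons]

-- ===== VERDICT (by name: the statement is the Claim_ definition above) =====
theorem count_matching_numbers_spec : Claim_equal_count_matching_numbers := by
  intro card _ hPre
  unfold Spec_count_matching_numbers count_matching_numbers count_matching_numbers_alt
  obtain ⟨k, hk⟩ := Option.isSome_iff_exists.mp
    ((PySem.List.index?_isSome_iff card "|").mpr hPre)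
  obtain ⟨hklen, -, -⟩ := PySem.List.getElem_of_index?_eq_some hk
  have hleft : PySem.List.slice card none (some (k : Int)) = card.take k :=
    PySem.List.slice_to_natCast card k
  have hlen : (card.take k).length = k := by
    simp [List.length_take, Nat.min_eq_left (Nat.le_of_lt hklen)]
  have main :
      (PySem.List.pyRange 0 (k : Int) 1).foldl
        (fun count i =>
          if (PySem.Set.ofList (PySem.List.slice card (some ((k : Int) + 1)) none)).contains
              (PySem.List.pyGetD card i "") then count + 1 else count) (0 : Int)
      = ((PySem.Set.ofList (PySem.List.slice card (some ((k : Int) + 1)) none)).map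
          (fun w => PySem.Dict.getD
            ((PySem.List.slice card none (some (k : Int))).foldl
              (fun d x => PySem.Dict.insert d x (PySem.Dict.getD d x 0 + 1)) PySem.Dict.empty)
            w 0)).sum := by
    set W : PySem.Set String :=
      PySem.Set.ofList (PySem.List.slice card (some ((k : Int) + 1)) none) with hWdef
    have hcongr : (PySem.List.pyRange 0 (k : Int) 1).foldl
        (fun count i => if W.contains (PySem.List.pyGetD card i "") then count + 1 else count) (0 : Int)
        = (PySem.List.pyRange 0 ((card.take k).length : Int) 1).foldl
        (fun count i => if W.contains (PySem.List.pyGetD (card.take k) i "") then count + 1 else count) (0 : Int) := by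
      rw [hlen]
      apply PySem.List.foldl_congr_mem
      intro acc i hi
      have hmem := (PySem.List.mem_pyRange_one).mp hi
      have h0 : 0 ≤ i := hmem.1
      have hik : i.toNat < k := by omega
      have hget : PySem.List.pyGetD card i "" = PySem.List.pyGetD (card.take k) i "" := by
        rw [PySem.List.pyGetD_of_nonneg card "" h0,
            PySem.List.pyGetD_of_nonneg (card.take k) "" h0]
        rw [List.getD_eq_getElem?_getD, List.getD_eq_getElem?_getD]
        rw [List.getElem?_take_of_lt hik]
      rw [hget]
    rw [hcongr, PySem.List.foldl_pyRange_zero_pyGetD' (card.take k) ""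
        (fun count x => if W.contains x then count + 1 else count) (0 : Int)]
    rw [PySem.List.foldl_if_add_one (fun x => W.contains x) (List.take k card) 0]
    rw [hleft, PySem.Dict.foldl_insert_getD_add_one_eq_counter]
    have hgetD : ∀ w : String, PySem.Dict.getD (PySem.Dict.counter (card.take k)) w 0
        = ((card.take k).count w : Int) := fun w => PySem.Dict.getD_counter _ _
    rw [List.map_congr_left (fun w _ => hgetD w)]
    rw [pv_sum_count_eq_countP W (PySem.Set.nodup_ofList _) (card.take k)]
    simp
  rw [hk]
  exact main
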